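-- pv_equiv track=rewrite | github.com/juanigremes/Introduccion-a-la-programacion | Python/parcialFiltrado2.py | torneo_de_gallinas
-- ===== SOURCE A (Python) =====
-- def resultados (estrategia1: str, estrategia2: str, puntosActuales: tuple[int,int]) -> list[int,int]:
--     res: list[int,int] = list(puntosActuales)
--     if estrategia1 == "me la banco y no me desvio" and estrategia2 == "me la banco y no me desvio":
--         res[0] -= 5
--         res[1] -= 5
--     elif estrategia1 == "me la banco y no me desvio" and estrategia2 == "me desvio siempre":
--         res[0] += 10
--         res[1] -= 15
--     elif estrategia1 == "me desvio siempre" and estrategia2 == "me la banco y no me desvio":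
--         res[0] -= 15
--         res[1] += 10
--     elif estrategia1 == "me desvio siempre" and estrategia2 == "me desvio siempre":
--         res[0] -= 10
--         res[1] -= 10
--     return res
--
-- def torneo_de_gallinas (estrategias: dict[str,str]) -> dict[str,int]:
--     res: dict[str,int] = {}
--     for jugador in estrategias.keys():
--         res[jugador] = 0
--
--     jugadores = list(estrategias.keys())
--     estrategiasJugadores = list(estrategias.values())
--     listaPartidas: list[tuple[str,str]] = []
--     listaPartidasJugadores: list[tuple[str,str]] = []
--
--     for i in range (0, len(jugadores), 1):
--         for n in range (i+1, len(jugadores), 1):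
--             listaPartidas.append([estrategiasJugadores[i],estrategiasJugadores[n]])
--             listaPartidasJugadores.append([jugadores[i],jugadores[n]])
--
--     for i in range (0, len(listaPartidas), 1):
--         jugador1 = listaPartidasJugadores[i][0]
--         jugador2 = listaPartidasJugadores[i][1]
--         estrategia1 = listaPartidas[i][0]
--         estrategia2 = listaPartidas[i][1]
--         resultadoPartida = resultados(estrategia1, estrategia2, tuple([res[jugador1],res[jugador2]]))
--         res[jugador1] = resultadoPartida[0]
--         res[jugador2] = resultadoPartida[1]
--
--     return res
-- ===== SOURCE B (Python) =====
-- # Closed form: each player's score depends only on the strategy counts, not on pair enumeration.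
-- def torneo_de_gallinas(estrategias: dict[str, str]) -> dict[str, int]:
--     BANCO = "me la banco y no me desvio"
--     DESVIO = "me desvio siempre"
--     vals = list(estrategias.values())
--     nb = vals.count(BANCO)
--     nd = vals.count(DESVIO)
--     res: dict[str, int] = {}
--     for jugador, estrategia in estrategias.items():
--         if estrategia == BANCO:
--             res[jugador] = 10 * nd - 5 * (nb - 1)
--         elif estrategia == DESVIO:
--             res[jugador] = -15 * nb - 10 * (nd - 1)
--         else:
--             res[jugador] = 0
--     return res
-- ===== Notes on version B (the rewrite author's own statement) =====
-- stated objective: faster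
-- what changed: B drops A's O(n^2) enumeration of all matches and computes each player's score in closed form from the two strategy counts (score depends only on how many opponents play each strategy).
import Mathlib
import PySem

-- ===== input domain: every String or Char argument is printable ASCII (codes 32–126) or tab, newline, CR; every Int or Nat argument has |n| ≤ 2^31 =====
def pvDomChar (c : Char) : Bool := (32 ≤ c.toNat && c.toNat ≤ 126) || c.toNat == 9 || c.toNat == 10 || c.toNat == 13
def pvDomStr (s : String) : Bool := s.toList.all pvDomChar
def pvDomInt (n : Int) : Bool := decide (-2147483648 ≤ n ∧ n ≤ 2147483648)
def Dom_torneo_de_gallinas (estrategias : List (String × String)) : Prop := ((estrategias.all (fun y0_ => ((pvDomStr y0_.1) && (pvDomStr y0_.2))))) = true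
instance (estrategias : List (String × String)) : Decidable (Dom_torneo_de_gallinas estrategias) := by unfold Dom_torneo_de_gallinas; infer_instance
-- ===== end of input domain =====

-- B replaces A's quadratic all-pairs simulation by a closed form from the two strategy counts (objective: faster).

-- ===== PORT A =====
-- helper `resultados`: the if/elif chain, returning the updated (res[0], res[1]) pair
def resultados (estrategia1 estrategia2 : String) (puntosActuales : Int × Int) : Int × Int :=
  if estrategia1 = "me la banco y no me desvio" ∧ estrategia2 = "me la banco y no me desvio" then
    (puntosActuales.1 - 5, puntosActuales.2 - 5)
  else if estrategia1 = "me la banco y no me desvio" ∧ estrategia2 = "me desvio siempre" then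
    (puntosActuales.1 + 10, puntosActuales.2 - 15)
  else if estrategia1 = "me desvio siempre" ∧ estrategia2 = "me la banco y no me desvio" then
    (puntosActuales.1 - 15, puntosActuales.2 + 10)
  else if estrategia1 = "me desvio siempre" ∧ estrategia2 = "me desvio siempre" then
    (puntosActuales.1 - 10, puntosActuales.2 - 10)
  else puntosActuales

-- the Python parameter is a dict: the association list is read through Python's dict constructor
def torneo_de_gallinas (estrategias : List (String × String)) : List (String × Int) :=
  let d : PySem.Dict String String := PySem.Dict.ofList estrategias
  let res : PySem.Dict String Int :=
    d.keys.foldl (fun r jugador => r.insert jugador 0) PySem.Dict.empty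
  let jugadores : List String := d.keys
  let estrategiasJugadores : List String := d.values
  -- the two appends of the nested loop, with the pair of lists as the loop state
  let listas : List (String × String) × List (String × String) :=
    (PySem.List.pyRange 0 (jugadores.length : Int)).foldl
      (fun acc i =>
        (PySem.List.pyRange (i + 1) (jugadores.length : Int)).foldl
          (fun acc n =>
            (acc.1 ++ [(PySem.List.pyGetD estrategiasJugadores i "", PySem.List.pyGetD estrategiasJugadores n "")],
             acc.2 ++ [(PySem.List.pyGetD jugadores i "", PySem.List.pyGetD jugadores n "")]))
          acc)
      ([], [])
  let listaPartidas := listas.1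
  let listaPartidasJugadores := listas.2
  -- indices and dict keys are always present here (Python would raise otherwise): pyGetD/getD defaults are never read
  let final : PySem.Dict String Int :=
    (PySem.List.pyRange 0 (listaPartidas.length : Int)).foldl
      (fun r i =>
        let jug := PySem.List.pyGetD listaPartidasJugadores i ("", "")
        let est := PySem.List.pyGetD listaPartidas i ("", "")
        let jugador1 := jug.1
        let jugador2 := jug.2
        let resultadoPartida := resultados est.1 est.2 (r.getD jugador1 0, r.getD jugador2 0)
        (r.insert jugador1 resultadoPartida.1).insert jugador2 resultadoPartida.2)
      res
  final.items

-- ===== PORT B =====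
def torneo_de_gallinas_alt (estrategias : List (String × String)) : List (String × Int) :=
  let d : PySem.Dict String String := PySem.Dict.ofList estrategias
  let vals : List String := d.values
  let nb : Int := vals.count "me la banco y no me desvio"
  let nd : Int := vals.count "me desvio siempre"
  d.items.map (fun p =>
    (p.1,
      if p.2 = "me la banco y no me desvio" then 10 * nd - 5 * (nb - 1)
      else if p.2 = "me desvio siempre" then -15 * nb - 10 * (nd - 1)
      else 0))

-- ===== PRECONDITION & SPEC =====
def Spec_torneo_de_gallinas (estrategias : List (String × String)) (out : List (String × Int)) : Prop := out = torneo_de_gallinas_alt estrategias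
instance (estrategias : List (String × String)) (out : List (String × Int)) : Decidable (Spec_torneo_de_gallinas estrategias out) := by unfold Spec_torneo_de_gallinas; infer_instance

-- ===== CLAIM (what is proved, stated in full; the proofs are below) =====
def Claim_equal_torneo_de_gallinas : Prop := ∀ (estrategias : List (String × String)), Dom_torneo_de_gallinas estrategias → Spec_torneo_de_gallinas estrategias (torneo_de_gallinas estrategias)


-- ===== LEMMAS AND PROOFS =====

-- per-match point change of the first player: pvDelta (own strategy) (opponent strategy)
def pvDelta (s t : String) : Int :=
  if s = "me la banco y no me desvio" then
    (if t = "me la banco y no me desvio" then -5 else if t = "me desvio siempre" then 10 else 0)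
  else if s = "me desvio siempre" then
    (if t = "me la banco y no me desvio" then -15 else if t = "me desvio siempre" then -10 else 0)
  else 0

-- all ordered pairs (earlier element, later element) — the matches A enumerates, in A's order
def pvPairs {α : Type} : List α → List (α × α)
  | [] => []
  | x :: rest => rest.map (fun y => (x, y)) ++ pvPairs rest

-- one iteration of A's match loop, on a pair of (player, strategy) entries
def pvStep (r : PySem.Dict String Int) (z : (String × String) × (String × String)) : PySem.Dict String Int :=
  let resultadoPartida := resultados z.1.2 z.2.2 (r.getD z.1.1 0, r.getD z.2.1 0)
  (r.insert z.1.1 resultadoPartida.1).insert z.2.1 resultadoPartida.2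

lemma resultados_delta (e1 e2 : String) (p : Int × Int) :
    resultados e1 e2 p = (p.1 + pvDelta e1 e2, p.2 + pvDelta e2 e1) := by
  unfold resultados pvDelta
  split_ifs <;> simp_all <;> constructor <;> omega

lemma pvPairs_map {α β : Type} (f : α → β) (l : List α) :
    pvPairs (l.map f) = (pvPairs l).map (fun z => (f z.1, f z.2)) := by
  induction l with
  | nil => rfl
  | cons x rest ih => simp [pvPairs, ih, List.map_map, Function.comp]

lemma mem_pvPairs {α : Type} {l : List α} {z : α × α} (h : z ∈ pvPairs l) :
    z.1 ∈ l ∧ z.2 ∈ l := by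
  induction l with
  | nil => simp [pvPairs] at h
  | cons x rest ih =>
    simp only [pvPairs, List.mem_append, List.mem_map] at h
    rcases h with ⟨y, hy, rfl⟩ | h
    · exact ⟨List.mem_cons_self, List.mem_cons_of_mem _ hy⟩
    · exact ⟨List.mem_cons_of_mem _ (ih h).1, List.mem_cons_of_mem _ (ih h).2⟩

-- an index loop reading two parallel map-images is a fold over the base list
lemma pv_foldl_two_idx {α β γ σ : Type} (base : List γ) (f : γ → α) (g : γ → β)
    (h : σ → α → β → σ) (da : α) (db : β) :
    ∀ (a : Nat) (s0 : σ),
      (PySem.List.pyRange (a : Int) (((base.map f).length : Int))).foldl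
          (fun s i => h s (PySem.List.pyGetD (base.map f) i da) (PySem.List.pyGetD (base.map g) i db)) s0
        = (base.drop a).foldl (fun s z => h s (f z) (g z)) s0 := by
  intro a
  induction hn : base.length - a generalizing a with
  | zero =>
    intro s0
    rw [PySem.List.pyRange_one_eq_nil (by simp; omega), List.drop_eq_nil_of_le (by omega)]
    rfl
  | succ n ih =>
    intro s0
    have ha : a < base.length := by omega
    rw [PySem.List.pyRange_one_cons (by simp; exact_mod_cast ha)]
    rw [List.drop_eq_getElem_cons ha]
    simp only [List.foldl_cons]
    rw [PySem.List.pyGetD_eq_getElem _ _ (by omega) (by simp; exact_mod_cast ha),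
        PySem.List.pyGetD_eq_getElem _ _ (by omega) (by simp; exact_mod_cast ha)]
    have : ((a : Int) + 1) = ((a + 1 : Nat) : Int) := by push_cast; ring
    rw [this, ih (a + 1) (by omega)]
    simp

-- the nested index loop enumerates exactly pvPairs
lemma pv_component {α : Type} (l : List α) (d : α) :
    ∀ (a : Nat) (acc : List (α × α)),
      (PySem.List.pyRange (a : Int) ((l.length : Int))).foldl
          (fun s i =>
            (PySem.List.pyRange (i + 1) ((l.length : Int))).foldl
              (fun s n => s ++ [(PySem.List.pyGetD l i d, PySem.List.pyGetD l n d)]) s)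
          acc
        = acc ++ pvPairs (l.drop a) := by
  intro a
  induction hn : l.length - a generalizing a with
  | zero =>
    intro acc
    rw [PySem.List.pyRange_one_eq_nil (by simp; omega), List.drop_eq_nil_of_le (by omega)]
    simp [pvPairs]
  | succ n ih =>
    intro acc
    have ha : a < l.length := by omega
    rw [PySem.List.pyRange_one_cons (by exact_mod_cast ha)]
    simp only [List.foldl_cons]
    rw [PySem.List.foldl_pyRange_pyGetD' l d
          (fun s y => s ++ [(PySem.List.pyGetD l (a : Int) d, y)]) acc (by omega)]
    rw [PySem.List.foldl_append_singleton_eq_map]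
    have h1 : ((a : Int) + 1) = ((a + 1 : Nat) : Int) := by push_cast; ring
    rw [h1, ih (a + 1) (by omega)]
    rw [List.drop_eq_getElem_cons ha]
    rw [PySem.List.pyGetD_eq_getElem _ _ (by omega) (by exact_mod_cast ha)]
    simp [pvPairs]

lemma pv_batch (x : String × String) (rest : List (String × String))
    (hx : x.1 ∉ rest.map Prod.fst) :
    ∀ (r : PySem.Dict String Int) (k : String),
      (rest.foldl (fun r y => pvStep r (x, y)) r).getD k 0 =
        r.getD k 0 + (if k = x.1 then ((rest.map (fun y => pvDelta x.2 y.2)).sum)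
                      else ((rest.filter (fun y => y.1 = k)).map (fun y => pvDelta y.2 x.2)).sum) := by
  induction rest with
  | nil => intro r k; simp
  | cons y rest ih =>
    intro r k
    have hxy : x.1 ≠ y.1 := by simp at hx; exact fun h => (hx.1 h)
    have hx' : x.1 ∉ rest.map Prod.fst := by simp at hx ⊢; exact hx.2
    simp only [List.foldl_cons]
    rw [ih hx']
    simp only [pvStep, resultados_delta, PySem.Dict.getD_insert]
    by_cases hk1 : k = x.1
    · subst hk1
      simp [hxy, List.sum_cons]
      ring
    · by_cases hk2 : k = y.1
      · subst hk2
        simp [hk1]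
        ring
      · simp [hk1, hk2, Ne.symm hk2]

lemma pv_step_keys (r : PySem.Dict String Int) (z : (String × String) × (String × String))
    (h1 : r.contains z.1.1 = true) (h2 : r.contains z.2.1 = true) :
    (pvStep r z).keys = r.keys := by
  unfold pvStep
  rw [PySem.Dict.keys_insert_of_contains, PySem.Dict.keys_insert_of_contains r _ h1]
  rw [PySem.Dict.contains_iff_mem_keys, PySem.Dict.keys_insert_of_contains r _ h1,
      ← PySem.Dict.contains_iff_mem_keys]
  exact h2

lemma pv_keys (l : List ((String × String) × (String × String))) :
    ∀ (r : PySem.Dict String Int), (∀ z ∈ l, r.contains z.1.1 = true ∧ r.contains z.2.1 = true) →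
      (l.foldl pvStep r).keys = r.keys := by
  induction l with
  | nil => intro r _; rfl
  | cons z l ih =>
    intro r hr
    have h1 := (hr z List.mem_cons_self).1
    have h2 := (hr z List.mem_cons_self).2
    have hk := pv_step_keys r z h1 h2
    simp only [List.foldl_cons]
    rw [ih _ (fun w hw => by
      have := hr w (List.mem_cons_of_mem _ hw)
      constructor <;> rw [PySem.Dict.contains_iff_mem_keys, hk, ← PySem.Dict.contains_iff_mem_keys]
      · exact this.1
      · exact this.2), hk]

lemma pv_untouched_gen (k : String) (l : List ((String × String) × (String × String))) :
    ∀ (r : PySem.Dict String Int), (∀ z ∈ l, z.1.1 ≠ k ∧ z.2.1 ≠ k) →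
      (l.foldl pvStep r).getD k 0 = r.getD k 0 := by
  induction l with
  | nil => intro r _; rfl
  | cons z l ih =>
    intro r hr
    simp only [List.foldl_cons]
    rw [ih _ (fun w hw => hr w (List.mem_cons_of_mem _ hw))]
    have h1 := (hr z List.mem_cons_self).1
    have h2 := (hr z List.mem_cons_self).2
    unfold pvStep
    rw [PySem.Dict.getD_insert, PySem.Dict.getD_insert]
    simp [Ne.symm h1, Ne.symm h2]

lemma pv_untouched (ps : List (String × String)) (r : PySem.Dict String Int) (k : String)
    (hk : k ∉ ps.map Prod.fst) :
    ((pvPairs ps).foldl pvStep r).getD k 0 = r.getD k 0 := by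
  apply pv_untouched_gen
  intro z hz
  have hm := mem_pvPairs hz
  constructor
  · exact fun h => hk (h ▸ List.mem_map_of_mem hm.1)
  · exact fun h => hk (h ▸ List.mem_map_of_mem hm.2)

lemma pv_filter_eq {l : List (String × String)} (hnd : (l.map Prod.fst).Nodup)
    {k sk : String} (h : (k, sk) ∈ l) :
    l.filter (fun y => y.1 = k) = [(k, sk)] := by
  induction l with
  | nil => simp at h
  | cons x l ih =>
    simp only [List.map_cons, List.nodup_cons] at hnd
    rcases List.mem_cons.mp h with hx | hl
    · subst hx
      have hnil : List.filter (fun y => decide (y.1 = k)) l = [] :=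
        List.filter_eq_nil_iff.mpr (fun y hy => by
          simp only [decide_eq_true_eq]
          exact fun hyk => hnd.1 (by rw [← hyk]; exact List.mem_map.mpr ⟨y, hy, rfl⟩))
      simp [hnil]
    · have hxk : x.1 ≠ k := fun h' => hnd.1 (by rw [h']; exact List.mem_map.mpr ⟨(k, sk), hl, rfl⟩)
      simp only [List.filter_cons, decide_eq_true_eq, if_neg hxk]
      exact ih hnd.2 hl

lemma pv_main (ps : List (String × String)) (hnd : (ps.map Prod.fst).Nodup) :
    ∀ (r : PySem.Dict String Int) (k sk : String), (k, sk) ∈ ps →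
      ((pvPairs ps).foldl pvStep r).getD k 0 =
        r.getD k 0 + (((ps.map (fun y => pvDelta sk y.2)).sum) - pvDelta sk sk) := by
  induction ps with
  | nil => intro r k sk h; simp at h
  | cons x rest ih =>
    intro r k sk h
    simp only [List.map_cons, List.nodup_cons] at hnd
    simp only [pvPairs, List.foldl_append, List.foldl_map]
    by_cases hk : k = x.1
    · subst hk
      have hxk : (x.1, sk) = x := by
        rcases List.mem_cons.mp h with h' | h'
        · exact h'
        · exact absurd (List.mem_map.mpr ⟨(x.1, sk), h', rfl⟩) hnd.1
      have hsk : sk = x.2 := congrArg Prod.snd hxk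
      rw [pv_untouched rest _ _ hnd.1, pv_batch x rest hnd.1, if_pos rfl]
      simp only [List.map_cons, List.sum_cons, hsk]
      ring
    · have hl : (k, sk) ∈ rest := by
        rcases List.mem_cons.mp h with h' | h'
        · exact absurd (congrArg Prod.fst h'.symm).symm hk
        · exact h'
      rw [ih hnd.2 _ k sk hl, pv_batch x rest hnd.1, if_neg hk,
          pv_filter_eq hnd.2 hl]
      simp only [List.map_cons, List.sum_cons, List.map_nil, List.sum_nil]
      ring

lemma pv_sum_delta (s : String) (l : List (String × String)) :
    (l.map (fun y => pvDelta s y.2)).sum =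
      pvDelta s "me la banco y no me desvio" * (((l.map Prod.snd).count "me la banco y no me desvio" : Int))
        + pvDelta s "me desvio siempre" * (((l.map Prod.snd).count "me desvio siempre" : Int)) := by
  induction l with
  | nil => simp
  | cons y l ih =>
    simp only [List.map_cons, List.sum_cons, List.count_cons, ih]
    by_cases h1 : y.2 = "me la banco y no me desvio"
    · simp [h1, pvDelta]
      split_ifs <;> first | (push_cast; ring) | simp_all
    · by_cases h2 : y.2 = "me desvio siempre"
      · simp [h2, pvDelta]
        split_ifs <;> first | (push_cast; ring) | simp_all
      · have hz : pvDelta s y.2 = 0 := by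
          unfold pvDelta
          split_ifs <;> simp_all
        simp [hz, h1, h2, Ne.symm]
        try push_cast
        try ring

-- the pair-of-lists loop state, split and expressed through pvPairs
lemma pv_listas (d : PySem.Dict String String) :
    (PySem.List.pyRange 0 ((d.keys.length : Int))).foldl
        (fun acc i =>
          (PySem.List.pyRange (i + 1) ((d.keys.length : Int))).foldl
            (fun acc n =>
              (acc.1 ++ [(PySem.List.pyGetD d.values i "", PySem.List.pyGetD d.values n "")],
               acc.2 ++ [(PySem.List.pyGetD d.keys i "", PySem.List.pyGetD d.keys n "")]))
            acc)
        (([], []) : List (String × String) × List (String × String))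
      = ((pvPairs d.items).map (fun z => (z.1.2, z.2.2)),
         (pvPairs d.items).map (fun z => (z.1.1, z.2.1))) := by
  have hinner : ∀ (i : Int) (acc : List (String × String) × List (String × String)),
      (PySem.List.pyRange (i + 1) ((d.keys.length : Int))).foldl
        (fun acc n =>
          (acc.1 ++ [(PySem.List.pyGetD d.values i "", PySem.List.pyGetD d.values n "")],
           acc.2 ++ [(PySem.List.pyGetD d.keys i "", PySem.List.pyGetD d.keys n "")])) acc
      = ((PySem.List.pyRange (i + 1) ((d.keys.length : Int))).foldl
            (fun s n => s ++ [(PySem.List.pyGetD d.values i "", PySem.List.pyGetD d.values n "")]) acc.1,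
         (PySem.List.pyRange (i + 1) ((d.keys.length : Int))).foldl
            (fun s n => s ++ [(PySem.List.pyGetD d.keys i "", PySem.List.pyGetD d.keys n "")]) acc.2) :=
    fun i acc => PySem.List.foldl_prod_mk
      (fun s n => s ++ [(PySem.List.pyGetD d.values i "", PySem.List.pyGetD d.values n "")])
      (fun s n => s ++ [(PySem.List.pyGetD d.keys i "", PySem.List.pyGetD d.keys n "")])
      (PySem.List.pyRange (i + 1) ((d.keys.length : Int))) acc.1 acc.2
  simp only [hinner]
  rw [PySem.List.foldl_prod_mk
        (fun s i => (PySem.List.pyRange (i + 1) ((d.keys.length : Int))).foldl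
          (fun s n => s ++ [(PySem.List.pyGetD d.values i "", PySem.List.pyGetD d.values n "")]) s)
        (fun s i => (PySem.List.pyRange (i + 1) ((d.keys.length : Int))).foldl
          (fun s n => s ++ [(PySem.List.pyGetD d.keys i "", PySem.List.pyGetD d.keys n "")]) s)
        (PySem.List.pyRange 0 ((d.keys.length : Int))) [] []]
  have hl : (d.keys.length : Int) = (d.values.length : Int) := by
    simp [PySem.Dict.keys, PySem.Dict.values]
  have h1 := pv_component d.values "" 0 ([] : List (String × String))
  have h2 := pv_component d.keys "" 0 ([] : List (String × String))
  simp only [Nat.cast_zero, List.drop_zero, List.nil_append] at h1 h2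
  rw [Prod.mk.injEq]
  constructor
  · rw [hl, h1]
    have : d.values = d.items.map (fun p => p.2) := rfl
    rw [this, pvPairs_map]
  · rw [h2]
    have : d.keys = d.items.map (fun p => p.1) := rfl
    rw [this, pvPairs_map]

-- A, after the dict is built, is the pvStep fold over pvPairs of the dict's items
lemma pv_A_eq (estrategias : List (String × String)) :
    torneo_de_gallinas estrategias =
      ((pvPairs (PySem.Dict.ofList estrategias).items).foldl pvStep
        ((PySem.Dict.ofList estrategias).keys.foldl
          (fun r jugador => r.insert jugador 0) PySem.Dict.empty)).items := by
  simp only [torneo_de_gallinas, pv_listas]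
  have h := pv_foldl_two_idx (pvPairs (PySem.Dict.ofList estrategias).items)
      (fun z => (z.1.2, z.2.2)) (fun z => (z.1.1, z.2.1))
      (fun r est jug =>
        (r.insert jug.1 (resultados est.1 est.2 (r.getD jug.1 0, r.getD jug.2 0)).1).insert
          jug.2 (resultados est.1 est.2 (r.getD jug.1 0, r.getD jug.2 0)).2)
      ("", "") ("", "") 0
      ((PySem.Dict.ofList estrategias).keys.foldl
        (fun r jugador => r.insert jugador 0) PySem.Dict.empty)
  simp only [Nat.cast_zero, List.drop_zero] at h
  rw [h]
  rfl

-- ===== VERDICT (by name: the statement is the Claim_ definition above) =====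
theorem torneo_de_gallinas_spec : Claim_equal_torneo_de_gallinas := by
  intro estrategias _
  unfold Spec_torneo_de_gallinas
  rw [pv_A_eq]
  have hkeys : (PySem.Dict.ofList estrategias).keys
      = (PySem.Dict.ofList estrategias).items.map Prod.fst := rfl
  have hvals : (PySem.Dict.ofList estrategias).values
      = (PySem.Dict.ofList estrategias).items.map Prod.snd := rfl
  generalize hps : (PySem.Dict.ofList estrategias).items = ps at *
  have hnd : (ps.map Prod.fst).Nodup := by
    rw [← hkeys]; exact PySem.Dict.nodup_keys_ofList estrategias
  set res0 : PySem.Dict String Int :=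
    (PySem.Dict.ofList estrategias).keys.foldl (fun r jugador => r.insert jugador 0)
      PySem.Dict.empty with hres0
  have hitems0 : res0.items = (ps.map Prod.fst).map (fun a => (a, (0 : Int))) := by
    rw [hres0, hkeys]
    have := PySem.Dict.items_foldl_insert_fresh (ps.map Prod.fst) (fun a => a)
      (fun _ => (0 : Int)) PySem.Dict.empty (by intro a _; simp)
      (by simpa using hnd)
    simpa using this
  have hkeys0 : res0.keys = ps.map Prod.fst := by
    show res0.items.map Prod.fst = _
    rw [hitems0, List.map_map]
    simp
  have hnd0 : res0.keys.Nodup := by rw [hkeys0]; exact hnd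
  have hcont : ∀ z ∈ pvPairs ps, res0.contains z.1.1 = true ∧ res0.contains z.2.1 = true := by
    intro z hz
    have hm := mem_pvPairs hz
    constructor <;> rw [PySem.Dict.contains_iff_mem_keys, hkeys0]
    · exact List.mem_map.mpr ⟨z.1, hm.1, rfl⟩
    · exact List.mem_map.mpr ⟨z.2, hm.2, rfl⟩
  have hfkeys : ((pvPairs ps).foldl pvStep res0).keys = ps.map Prod.fst := by
    rw [pv_keys (pvPairs ps) res0 hcont, hkeys0]
  have hfnd : ((pvPairs ps).foldl pvStep res0).keys.Nodup := by rw [hfkeys]; exact hnd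
  rw [PySem.Dict.items_eq_map_keys _ hfnd 0, hfkeys]
  simp only [torneo_de_gallinas_alt, hvals, hps, List.map_map]
  apply List.map_congr_left
  intro p hp
  simp only [Function.comp]
  have h0 : res0.getD p.1 0 = 0 := by
    apply PySem.Dict.getD_of_mem_items res0 _ hnd0
    rw [hitems0]
    exact List.mem_map.mpr ⟨p.1, List.mem_map.mpr ⟨p, hp, rfl⟩, rfl⟩
  rw [pv_main ps hnd res0 p.1 p.2 hp, h0, pv_sum_delta]
  by_cases h1 : p.2 = "me la banco y no me desvio"
  · simp [pvDelta, h1]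
    ring
  · by_cases h2 : p.2 = "me desvio siempre"
    · simp [pvDelta, h2]
      ring
    · simp [pvDelta, h1, h2]
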